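-- pv_equiv track=rewrite | github.com/nlenno1/moviewiki-ms3 | app.py | create_new_latest_reviews
-- ===== SOURCE A (Python) =====
-- def create_new_latest_reviews(review_list, new_review_dict,
--                               to_compare_1, to_compare_2):
--     new_review_list = [review for review in review_list if
--                        review[to_compare_1] != to_compare_2]
--
--     if len(new_review_list) > 2:
--         new_review_list = new_review_list[0:2]
--     new_review_list.append(new_review_dict)
--     return new_review_list
-- ===== SOURCE B (Python) =====
-- def create_new_latest_reviews(review_list, new_review_dict,
--                               to_compare_1, to_compare_2):
--     # Recursive decomposition: build the result front-to-back by consing,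
--     # carrying a countdown of remaining slots; the new dict is emitted at
--     # the recursion base (no intermediate filtered list, no slice, no append).
--     def build(reviews, slots):
--         if slots == 0 or not reviews:
--             return [new_review_dict]
--         head = reviews[0]
--         rest = reviews[1:]
--         if head[to_compare_1] != to_compare_2:
--             return [head] + build(rest, slots - 1)
--         return build(rest, slots)
--     return build(review_list, 2)
-- ===== Notes on version B (the rewrite author's own statement) =====
-- stated objective: alternative
-- what changed: Replaces the filter-then-slice-then-append pipeline with a structural recursion that conses the first two surviving reviews front-to-back, carries a remaining-slot countdown, and emits the new review dict at the recursion base instead of appending it.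
import Mathlib
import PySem

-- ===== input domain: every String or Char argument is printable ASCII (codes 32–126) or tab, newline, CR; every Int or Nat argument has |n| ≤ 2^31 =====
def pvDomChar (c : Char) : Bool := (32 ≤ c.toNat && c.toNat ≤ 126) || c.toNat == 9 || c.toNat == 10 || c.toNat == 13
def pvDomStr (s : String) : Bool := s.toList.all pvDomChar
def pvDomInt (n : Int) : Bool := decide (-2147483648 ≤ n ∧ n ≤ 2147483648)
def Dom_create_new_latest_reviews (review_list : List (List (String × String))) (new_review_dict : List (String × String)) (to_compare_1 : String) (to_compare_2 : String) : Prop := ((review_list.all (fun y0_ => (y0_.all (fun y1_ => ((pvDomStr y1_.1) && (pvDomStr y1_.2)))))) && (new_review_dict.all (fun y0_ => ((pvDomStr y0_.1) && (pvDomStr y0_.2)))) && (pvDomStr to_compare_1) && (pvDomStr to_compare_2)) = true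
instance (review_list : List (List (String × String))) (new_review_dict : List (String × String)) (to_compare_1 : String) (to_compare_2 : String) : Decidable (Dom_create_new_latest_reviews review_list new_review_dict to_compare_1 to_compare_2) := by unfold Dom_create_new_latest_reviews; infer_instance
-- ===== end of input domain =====

-- B replaces A's filter-then-slice-then-append pipeline with a structural recursion consing the first two survivors and emitting the new dict at the base (alternative decomposition, same result).

-- ===== PORT A =====
-- review[to_compare_1]: dict lookup; Pre_ guarantees the key is present, so the "" default is never the value used
def create_new_latest_reviews (review_list : List (List (String × String))) (new_review_dict : List (String × String)) (to_compare_1 : String) (to_compare_2 : String) : List (List (String × String)) :=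
  let new_review_list := review_list.filter (fun review => PySem.Dict.getD (PySem.Dict.mk review) to_compare_1 "" ≠ to_compare_2)
  let new_review_list2 := if new_review_list.length > 2 then PySem.List.slice new_review_list (some 0) (some 2) else new_review_list
  new_review_list2 ++ [new_review_dict]

-- ===== PORT B =====
def pvBuild (new_review_dict : List (String × String)) (to_compare_1 to_compare_2 : String) :
    List (List (String × String)) → Nat → List (List (String × String))
  | _, 0 => [new_review_dict]
  | [], _ + 1 => [new_review_dict]
  | head :: rest, slots + 1 =>
    if PySem.Dict.getD (PySem.Dict.mk head) to_compare_1 "" ≠ to_compare_2 then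
      head :: pvBuild new_review_dict to_compare_1 to_compare_2 rest slots
    else
      pvBuild new_review_dict to_compare_1 to_compare_2 rest (slots + 1)

def create_new_latest_reviews_alt (review_list : List (List (String × String))) (new_review_dict : List (String × String)) (to_compare_1 : String) (to_compare_2 : String) : List (List (String × String)) :=
  pvBuild new_review_dict to_compare_1 to_compare_2 review_list 2

-- ===== PRECONDITION & SPEC =====
-- Pre_: every review contains the key to_compare_1 (otherwise Python A raises KeyError)
def Pre_create_new_latest_reviews (review_list : List (List (String × String))) (new_review_dict : List (String × String)) (to_compare_1 : String) (to_compare_2 : String) : Prop :=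
  ∀ review ∈ review_list, (PySem.Dict.get? (PySem.Dict.mk review) to_compare_1).isSome = true
instance (review_list : List (List (String × String))) (new_review_dict : List (String × String)) (to_compare_1 : String) (to_compare_2 : String) : Decidable (Pre_create_new_latest_reviews review_list new_review_dict to_compare_1 to_compare_2) := by unfold Pre_create_new_latest_reviews; infer_instance

def pvWitness_create_new_latest_reviews : (List (List (String × String))) × (List (String × String)) × String × String :=
  ([[("a", "x")], [("a", "y")]], [("a", "n")], "a", "y")

def Spec_create_new_latest_reviews (review_list : List (List (String × String))) (new_review_dict : List (String × String)) (to_compare_1 : String) (to_compare_2 : String) (out : List (List (String × String))) : Prop := out = create_new_latest_reviews_alt review_list new_review_dict to_compare_1 to_compare_2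
instance (review_list : List (List (String × String))) (new_review_dict : List (String × String)) (to_compare_1 : String) (to_compare_2 : String) (out : List (List (String × String))) : Decidable (Spec_create_new_latest_reviews review_list new_review_dict to_compare_1 to_compare_2 out) := by unfold Spec_create_new_latest_reviews; infer_instance

-- ===== CLAIM =====
def Claim_equal_create_new_latest_reviews : Prop := ∀ (review_list : List (List (String × String))) (new_review_dict : List (String × String)) (to_compare_1 : String) (to_compare_2 : String), Dom_create_new_latest_reviews review_list new_review_dict to_compare_1 to_compare_2 → Pre_create_new_latest_reviews review_list new_review_dict to_compare_1 to_compare_2 → Spec_create_new_latest_reviews review_list new_review_dict to_compare_1 to_compare_2 (create_new_latest_reviews review_list new_review_dict to_compare_1 to_compare_2)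

-- ===== LEMMAS AND PROOFS =====

theorem pvBuild_eq_take (nd : List (String × String)) (k1 k2 : String) (l : List (List (String × String))) :
    ∀ slots : Nat, pvBuild nd k1 k2 l slots = (l.filter (fun r => PySem.Dict.getD (PySem.Dict.mk r) k1 "" ≠ k2)).take slots ++ [nd] := by
  induction l with
  | nil => intro slots; cases slots <;> simp [pvBuild]
  | cons r rs ih =>
    intro slots
    cases slots with
    | zero => simp [pvBuild]
    | succ s =>
      by_cases hp : PySem.Dict.getD (PySem.Dict.mk r) k1 "" = k2
      · simp only [pvBuild]
        rw [if_neg (by simp [hp]), List.filter_cons_of_neg (by simp [hp])]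
        exact ih (s + 1)
      · simp only [pvBuild]
        rw [if_pos hp, List.filter_cons_of_pos (by simp [hp]), List.take_succ_cons, ih s]
        simp

theorem portA_eq_take (rl : List (List (String × String))) (nd : List (String × String)) (k1 k2 : String) :
    create_new_latest_reviews rl nd k1 k2 = (rl.filter (fun r => PySem.Dict.getD (PySem.Dict.mk r) k1 "" ≠ k2)).take 2 ++ [nd] := by
  unfold create_new_latest_reviews
  set f := rl.filter (fun r => PySem.Dict.getD (PySem.Dict.mk r) k1 "" ≠ k2) with hf
  by_cases h : f.length > 2
  · simp only [if_pos h]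
    congr 1
    rw [show ((2 : Int) = ((2 : Nat) : Int)) by norm_num, PySem.List.slice_zero_start,
      PySem.List.slice_to_natCast]
  · simp only [if_neg h]
    rw [List.take_of_length_le (by omega)]

-- ===== VERDICT =====
theorem create_new_latest_reviews_spec : Claim_equal_create_new_latest_reviews := by
  intro rl nd k1 k2 _ _
  unfold Spec_create_new_latest_reviews create_new_latest_reviews_alt
  rw [portA_eq_take, pvBuild_eq_take]
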